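-- pv_equiv track=rewrite | github.com/ar-russ/Pivo-Bot | main.py | convert_num_to_color
-- ===== SOURCE A (Python) =====
-- def convert_num_to_color(num: int) -> tuple:
--     '''
--     Конвертирует число в кортеж с цветом в формате RGB
--         Параметры:
--             num (int) : Число, которое нужно конвертировать
--     '''
--     if num // 100 < 1:
--         raise ValueError("ID is not long enough")
--     num_str = str(num) # Для красоты и разборчивости в последующих строках
--     a = int(len(num_str) / 3)
--     color_list = [int(num_str[:a]), int(num_str[a:2*a]), int(num_str[2*a:])]
--     for index, element in enumerate(color_list):
--         while element > 255:
--             element = element // 2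
--         color_list[index] = element
--     return tuple(color_list)
-- ===== SOURCE B (Python) =====
-- def convert_num_to_color(num: int) -> tuple:
--     """Same ID-to-RGB conversion, with the per-element halving while-loop
--     replaced by a closed-form single right shift."""
--     if num // 100 < 1:
--         raise ValueError("ID is not long enough")
--     s = str(num)
--     a = int(len(s) / 3)
--     return tuple(
--         c if c <= 255 else c >> (c.bit_length() - 8)
--         for c in (int(s[:a]), int(s[a:2 * a]), int(s[2 * a:]))
--     )
-- ===== Notes on version B (the rewrite author's own statement) =====
-- stated objective: idiomatic
-- what changed: The mutable color_list with an enumerate loop and a repeated-halving while-loop is replaced by a tuple comprehension whose elements are reduced in closed form with a single bit shift (c >> (c.bit_length()-8)).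
import Mathlib
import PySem

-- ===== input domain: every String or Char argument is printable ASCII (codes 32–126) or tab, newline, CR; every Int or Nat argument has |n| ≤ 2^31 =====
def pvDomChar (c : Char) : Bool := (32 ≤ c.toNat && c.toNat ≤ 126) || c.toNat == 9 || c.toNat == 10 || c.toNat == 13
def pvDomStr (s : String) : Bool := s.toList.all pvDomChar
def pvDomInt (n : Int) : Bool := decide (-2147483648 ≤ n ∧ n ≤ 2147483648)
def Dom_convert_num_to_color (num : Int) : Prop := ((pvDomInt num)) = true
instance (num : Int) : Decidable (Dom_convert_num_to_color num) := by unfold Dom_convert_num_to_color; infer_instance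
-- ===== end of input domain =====

-- B replaces A's enumerate loop with a repeated-halving while-loop by a tuple comprehension
-- using a closed-form bit shift (idiomatic; same cost).

-- ===== PORT A =====
-- 'while element > 255: element = element // 2'
def pvHalve (e : Int) : Int :=
  if 255 < e then pvHalve (PySem.Int.floordiv e 2) else e
termination_by e.toNat
decreasing_by
  rw [PySem.Int.floordiv_eq_ediv_of_pos (by omega : (0:Int) < 2)]
  omega

def convert_num_to_color (num : Int) : Int × Int × Int :=
  -- 'if num // 100 < 1: raise ValueError' — excluded by Pre_ (num < 100)
  let num_str := PySem.Int.toChars num                  -- num_str = str(num)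
  let a := num_str.length / 3                           -- int(len(num_str)/3): exact for the short lengths arising here
  -- under Pre_ every slice is a nonempty digit string, so ofChars? is always `some` and .getD 0 never fires
  let color_list := [(PySem.Int.ofChars? (num_str.take a)).getD 0,        -- int(num_str[:a])  (slices with bounds 0 ≤ a clamp like take/drop, exact)
                     (PySem.Int.ofChars? ((num_str.drop a).take a)).getD 0,  -- int(num_str[a:2*a])
                     (PySem.Int.ofChars? (num_str.drop (2 * a))).getD 0]     -- int(num_str[2*a:])
  -- 'for index, element in enumerate(color_list): … color_list[index] = element'
  let color_list := (PySem.List.enumerate color_list).foldl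
      (fun cl ie => cl.set ie.1.toNat (pvHalve ie.2)) color_list
  match color_list with
  | [r, g, b] => (r, g, b)
  | _ => (0, 0, 0)   -- unreachable: color_list has exactly three elements

-- ===== PORT B =====
-- 'c if c <= 255 else c >> (c.bit_length() - 8)'
def pvBitReduce (c : Int) : Int :=
  if c ≤ 255 then c else c >>> (PySem.Int.bitLength c - 8)

def convert_num_to_color_alt (num : Int) : Int × Int × Int :=
  -- same guard 'if num // 100 < 1: raise ValueError' — excluded by Pre_
  let s := PySem.Int.toChars num                        -- s = str(num)
  let a := s.length / 3                                 -- int(len(s)/3)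
  -- tuple(pvBitReduce c for c in (int(s[:a]), int(s[a:2*a]), int(s[2*a:])))
  let f := fun ch => pvBitReduce ((PySem.Int.ofChars? ch).getD 0)
  (f (s.take a), f ((s.drop a).take a), f (s.drop (2 * a)))

-- ===== PRECONDITION & SPEC =====
-- A raises ValueError exactly when num // 100 < 1, i.e. num < 100.
def Pre_convert_num_to_color (num : Int) : Prop := 100 ≤ num
instance (num : Int) : Decidable (Pre_convert_num_to_color num) := by unfold Pre_convert_num_to_color; infer_instance
def pvWitness_convert_num_to_color : Int := 31415926

def Spec_convert_num_to_color (num : Int) (out : Int × Int × Int) : Prop := out = convert_num_to_color_alt num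
instance (num : Int) (out : Int × Int × Int) : Decidable (Spec_convert_num_to_color num out) := by unfold Spec_convert_num_to_color; infer_instance

-- ===== CLAIM (what is proved, stated in full; the proofs are below) =====
def Claim_equal_convert_num_to_color : Prop := ∀ (num : Int), Dom_convert_num_to_color num → Pre_convert_num_to_color num → Spec_convert_num_to_color num (convert_num_to_color num)

-- ===== LEMMAS AND PROOFS =====

-- repeated floor-halving until ≤ 255 is a single shift by (bit_length - 8)
theorem pvHalve_eq_div_pow : ∀ (k : Nat) (e : Int), e.toNat ≤ k → 255 < e →
    pvHalve e = e / (2 : Int) ^ (PySem.Int.bitLength e - 8) := by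
  intro k
  induction k with
  | zero => intro e hk h; omega
  | succ k ih =>
    intro e hk h
    have h2 : PySem.Int.floordiv e 2 = e / 2 :=
      PySem.Int.floordiv_eq_ediv_of_pos (by omega)
    have hbl : PySem.Int.bitLength e = PySem.Int.bitLength (e / 2) + 1 := by
      rw [PySem.Int.bitLength_of_pos (by omega), h2]
    rw [pvHalve, if_pos h, h2]
    by_cases h255 : 255 < e / 2
    · have hb9 : 9 ≤ PySem.Int.bitLength (e / 2) := by
        by_contra hc
        push Not at hc
        have h1 := PySem.Int.lt_two_pow_bitLength (e / 2)
        have h2' : (e / 2).natAbs < 2 ^ 8 := lt_of_lt_of_le h1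
          (Nat.pow_le_pow_right (by omega) (by omega))
        omega
      rw [ih (e / 2) (by omega) h255, hbl,
          Int.ediv_ediv_of_nonneg (by positivity),
          show PySem.Int.bitLength (e / 2) + 1 - 8
             = (PySem.Int.bitLength (e / 2) - 8) + 1 from by omega,
          pow_succ]
      ring_nf
    · -- here 256 ≤ e ≤ 511, the bit length is 9 and one halving suffices
      rw [pvHalve, if_neg h255]
      have hlo := PySem.Int.two_pow_bitLength_le e (by omega)
      have hhi := PySem.Int.lt_two_pow_bitLength e
      have hb : PySem.Int.bitLength e = 9 := by
        by_contra hb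
        rcases Nat.lt_or_ge (PySem.Int.bitLength e) 9 with hl | hg
        · have : e.natAbs < 2 ^ 8 := lt_of_lt_of_le hhi
            (Nat.pow_le_pow_right (by omega) (by omega))
          omega
        · have h10 : 10 ≤ PySem.Int.bitLength e := by omega
          have : 2 ^ 9 ≤ 2 ^ (PySem.Int.bitLength e - 1) :=
            Nat.pow_le_pow_right (by omega) (by omega)
          omega
      rw [hb]
      norm_num

theorem pvHalve_eq_pvBitReduce (e : Int) : pvHalve e = pvBitReduce e := by
  by_cases h : 255 < e
  · rw [pvHalve_eq_div_pow e.toNat e le_rfl h, pvBitReduce, if_neg (by omega),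
        Int.shiftRight_eq_div_pow]
    norm_cast
  · rw [pvHalve, pvBitReduce, if_neg h, if_pos (by omega)]

-- ===== VERDICT (by name: the statement is the Claim_ definition above) =====
theorem convert_num_to_color_spec : Claim_equal_convert_num_to_color := by
  intro num _ _
  unfold Spec_convert_num_to_color convert_num_to_color convert_num_to_color_alt
  simp [PySem.List.enumerate, pvHalve_eq_pvBitReduce]
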